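-- pv_equiv track=rewrite | github.com/safeiris/content | length_controller.py | _build_protection_mask
-- ===== SOURCE A (Python) =====
-- from typing import Iterable, List, Optional, Tuple
--
-- def _build_protection_mask(text: str, tokens: Iterable[str]) -> List[bool]:
--     mask = [False] * len(text)
--     for token in tokens:
--         if not token:
--             continue
--         start = 0
--         while True:
--             idx = text.find(token, start)
--             if idx == -1:
--                 break
--             for pos in range(idx, min(idx + len(token), len(mask))):
--                 mask[pos] = True
--             start = idx + len(token)
--     return mask
-- ===== SOURCE B (Python) =====
-- from typing import Iterable, List
--
--
-- def _build_protection_mask(text: str, tokens: Iterable[str]) -> List[bool]: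
--     n = len(text)
--     # Phase 1: collect the non-overlapping occurrence spans of every token.
--     spans = []
--     for token in tokens:
--         if not token:
--             continue
--         idx = text.find(token)
--         while idx != -1:
--             spans.append((idx, idx + len(token)))
--             idx = text.find(token, idx + len(token))
--     # Phase 2: difference array + prefix-sum sweep instead of in-place marking.
--     delta = [0] * (n + 1)
--     for a, b in spans:
--         delta[a] += 1
--         delta[b] -= 1
--     mask = []
--     cur = 0
--     for d in delta[:n]:
--         cur += d
--         mask.append(cur > 0)
--     return mask
-- ===== Notes on version B (the rewrite author's own statement) =====
-- stated objective: alternative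
-- what changed: Instead of mutating the boolean mask position-by-position inside the find loop, B first collects all occurrence spans, then builds a difference array (+1 at span start, -1 at span end) and emits the mask in one prefix-sum sweep, so each span costs O(1) marking work regardless of its length.
import Mathlib
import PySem

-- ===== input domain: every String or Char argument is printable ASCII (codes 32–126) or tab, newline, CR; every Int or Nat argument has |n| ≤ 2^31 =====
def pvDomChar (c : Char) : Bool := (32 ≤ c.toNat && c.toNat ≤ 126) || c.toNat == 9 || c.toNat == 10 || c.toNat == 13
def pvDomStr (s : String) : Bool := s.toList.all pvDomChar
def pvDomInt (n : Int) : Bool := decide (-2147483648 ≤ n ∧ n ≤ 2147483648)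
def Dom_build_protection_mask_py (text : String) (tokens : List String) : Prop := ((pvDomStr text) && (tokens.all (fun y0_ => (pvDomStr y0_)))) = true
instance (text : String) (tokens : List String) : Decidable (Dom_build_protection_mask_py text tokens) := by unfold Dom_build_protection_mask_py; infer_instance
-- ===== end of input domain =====

-- ===== PORT A =====
-- One honest line: B replaces A's in-place per-position marking with a span list,
-- a difference array and a prefix-sum sweep (alternative algorithm, same results).

-- inner 'for pos in range(idx, min(idx + len(token), len(mask))): mask[pos] = True'
def pvA_markRange (mask : List Bool) (a b : Int) : List Bool :=
  (PySem.List.pyRange a b 1).foldl (fun m pos => PySem.List.pySetD m pos true) mask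

-- 'while True: idx = text.find(token, start); if idx == -1: break; …; start = idx + len(token)'
-- (fuel: each successful find advances start by len(token) ≥ 1, so len(text)+1 rounds suffice)
def pvA_loop (text token : List Char) (mask : List Bool) (start : Nat) : Nat → List Bool
  | 0 => mask
  | fuel + 1 =>
      let idx := PySem.Chars.findFrom text token (start : Int)
      if idx = -1 then mask
      else pvA_loop text token
             (pvA_markRange mask idx (min (idx + token.length) (mask.length : Int)))
             (idx.toNat + token.length) fuel

def build_protection_mask_py (text : String) (tokens : List String) : List Bool :=
  tokens.foldl
    (fun mask token =>
      if token = "" then mask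
      else pvA_loop text.toList token.toList mask 0 (text.toList.length + 1))
    (List.replicate text.toList.length false)

-- ===== PORT B =====
-- 'idx = text.find(token); while idx != -1: spans.append((idx, idx+len(token))); idx = text.find(token, idx+len(token))'
def pvB_scan (text token : List Char) (start : Nat) : Nat → List (Int × Int)
  | 0 => []
  | fuel + 1 =>
      let idx := PySem.Chars.findFrom text token (start : Int)
      if idx = -1 then []
      else (idx, idx + token.length) :: pvB_scan text token (idx.toNat + token.length) fuel

-- 'for token in tokens: if not token: continue; <scan>'
def pvB_spans (text : List Char) (tokens : List String) : List (Int × Int) :=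
  tokens.foldl
    (fun spans token =>
      if token = "" then spans
      else spans ++ pvB_scan text token.toList 0 (text.length + 1)) []

-- 'delta = [0]*(n+1); for a, b in spans: delta[a] += 1; delta[b] -= 1'
def pvB_delta (n : Nat) (spans : List (Int × Int)) : List Int :=
  spans.foldl
    (fun delta ab =>
      let d1 := PySem.List.pySetD delta ab.1 (PySem.List.pyGetD delta ab.1 0 + 1)
      PySem.List.pySetD d1 ab.2 (PySem.List.pyGetD d1 ab.2 0 - 1))
    (List.replicate (n + 1) 0)

-- 'cur = 0; for d in delta[:n]: cur += d; mask.append(cur > 0)'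
def pvB_sweep (cur : Int) : List Int → List Bool
  | [] => []
  | d :: ds => decide (0 < cur + d) :: pvB_sweep (cur + d) ds

def build_protection_mask_py_alt (text : String) (tokens : List String) : List Bool :=
  pvB_sweep 0
    (PySem.List.slice (pvB_delta text.toList.length (pvB_spans text.toList tokens))
      none (some (text.toList.length : Int)))

-- ===== PRECONDITION & SPEC =====
def Spec_build_protection_mask_py (text : String) (tokens : List String) (out : List Bool) : Prop := out = build_protection_mask_py_alt text tokens
instance (text : String) (tokens : List String) (out : List Bool) : Decidable (Spec_build_protection_mask_py text tokens out) := by unfold Spec_build_protection_mask_py; infer_instance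

-- ===== CLAIM (what is proved, stated in full; the proofs are below) =====
def Claim_equal_build_protection_mask_py : Prop := ∀ (text : String) (tokens : List String), Dom_build_protection_mask_py text tokens → Spec_build_protection_mask_py text tokens (build_protection_mask_py text tokens)

-- ===== LEMMAS AND PROOFS =====

-- a well-formed span: non-negative start, non-empty, ends within the text
def pvGood (n : Nat) (ab : Int × Int) : Prop :=
  0 ≤ ab.1 ∧ ab.1 < ab.2 ∧ ab.2 ≤ (n : Int)

-- the step A's marking fold performs on one span
def pvMark (m : List Bool) (ab : Int × Int) : List Bool :=
  pvA_markRange m ab.1 (min ab.2 (m.length : Int))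

-- A's inner loop is the marking fold over B's span list (same fuel, same finds)
theorem pvA_loop_eq_scan (text token : List Char) :
    ∀ (fuel : Nat) (start : Nat) (mask : List Bool),
    pvA_loop text token mask start fuel =
      (pvB_scan text token start fuel).foldl pvMark mask := by
  intro fuel
  induction fuel with
  | zero => intro start mask; rfl
  | succ f ih =>
      intro start mask
      simp only [pvA_loop, pvB_scan]
      by_cases h : PySem.Chars.findFrom text token (start : Int) = -1
      · simp [h]
      · simp only [h, ih]
        rfl

-- B's span accumulator appends on the right
theorem pvB_spans_acc (text : List Char) (tokens : List String) :
    ∀ (acc : List (Int × Int)),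
    tokens.foldl
      (fun spans token =>
        if token = "" then spans
        else spans ++ pvB_scan text token.toList 0 (text.length + 1)) acc
      = acc ++ pvB_spans text tokens := by
  induction tokens with
  | nil => intro acc; simp [pvB_spans]
  | cons tok ts ih =>
      intro acc
      by_cases h : tok = ""
      · simp only [pvB_spans, List.foldl_cons, if_pos h]
        rw [ih acc, ih []]
        simp
      · simp only [pvB_spans, List.foldl_cons, if_neg h]
        rw [ih (acc ++ pvB_scan text tok.toList 0 (text.length + 1)),
            ih ([] ++ pvB_scan text tok.toList 0 (text.length + 1))]
        simp

-- A's whole computation is the marking fold over the full span list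
theorem pvA_eq_markfold (text : String) (tokens : List String) :
    build_protection_mask_py text tokens =
      (pvB_spans text.toList tokens).foldl pvMark
        (List.replicate text.toList.length false) := by
  unfold build_protection_mask_py
  generalize (List.replicate text.toList.length false) = mask
  induction tokens generalizing mask with
  | nil => simp [pvB_spans]
  | cons tok ts ih =>
      by_cases h : tok = ""
      · simp only [List.foldl_cons, if_pos h]
        rw [ih]
        have : pvB_spans text.toList (tok :: ts) = pvB_spans text.toList ts := by
          simp only [pvB_spans, List.foldl_cons, if_pos h]
        rw [this]
      · simp only [List.foldl_cons, if_neg h]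
        rw [ih]
        have hsp : pvB_spans text.toList (tok :: ts)
            = pvB_scan text.toList tok.toList 0 (text.toList.length + 1)
              ++ pvB_spans text.toList ts := by
          simp only [pvB_spans, List.foldl_cons, if_neg h]
          have := pvB_spans_acc text.toList ts
            ([] ++ pvB_scan text.toList tok.toList 0 (text.toList.length + 1))
          simpa [pvB_spans] using this
        rw [hsp, List.foldl_append, pvA_loop_eq_scan]

-- every span produced by a scan is well formed
theorem pvB_scan_good (text token : List Char) (hne : token ≠ []) :
    ∀ (fuel start : Nat), start ≤ text.length →
    ∀ ab ∈ pvB_scan text token start fuel, pvGood text.length ab := by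
  intro fuel
  induction fuel with
  | zero => intro start hs ab hab; simp [pvB_scan] at hab
  | succ f ih =>
      intro start hs ab hab
      simp only [pvB_scan] at hab
      by_cases h : PySem.Chars.findFrom text token (start : Int) = -1
      · simp [h] at hab
      · rw [if_neg h] at hab
        obtain ⟨hk, hpref, -⟩ :=
          PySem.Chars.findFrom_natCast_spec text token start hs h
        set idx := PySem.Chars.findFrom text token (start : Int) with hidx
        have h0 : (0 : Int) ≤ idx := le_trans (by omega) hk
        have hdrop : token.length ≤ (text.drop idx.toNat).length :=
          List.IsPrefix.length_le hpref
        have htok : 0 < token.length := List.length_pos_of_ne_nil hne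
        have hfit : idx.toNat + token.length ≤ text.length := by
          rw [List.length_drop] at hdrop
          omega
        rcases List.mem_cons.mp hab with rfl | hab
        · refine ⟨h0, by omega, ?_⟩
          have : (idx.toNat : Int) = idx := Int.toNat_of_nonneg h0
          push_cast
          omega
        · exact ih (idx.toNat + token.length) (by omega) ab hab

theorem pvB_spans_good (text : List Char) (tokens : List String) :
    ∀ ab ∈ pvB_spans text tokens, pvGood text.length ab := by
  induction tokens with
  | nil => intro ab hab; simp [pvB_spans] at hab
  | cons tok ts ih =>
      intro ab hab
      by_cases h : tok = ""
      · rw [show pvB_spans text (tok :: ts) = pvB_spans text ts by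
          simp only [pvB_spans, List.foldl_cons, if_pos h]] at hab
        exact ih ab hab
      · rw [show pvB_spans text (tok :: ts)
            = pvB_scan text tok.toList 0 (text.length + 1) ++ pvB_spans text ts by
          simp only [pvB_spans, List.foldl_cons, if_neg h]
          simpa [pvB_spans] using pvB_spans_acc text ts
            ([] ++ pvB_scan text tok.toList 0 (text.length + 1))] at hab
        rcases List.mem_append.mp hab with hab | hab
        · have hne : tok.toList ≠ [] := by simpa using h
          exact pvB_scan_good text tok.toList hne (text.length + 1) 0 (by omega) ab hab
        · exact ih ab hab

-- marking preserves the mask length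
theorem length_pvA_markRange (a b : Int) :
    ∀ (m : List Bool), (pvA_markRange m a b).length = m.length := by
  unfold pvA_markRange
  generalize PySem.List.pyRange a b 1 = l
  induction l with
  | nil => intro m; rfl
  | cons x xs ih => intro m; simp [List.foldl_cons, ih, PySem.List.length_pySetD]

theorem length_markfold (S : List (Int × Int)) :
    ∀ (m : List Bool), (S.foldl pvMark m).length = m.length := by
  induction S with
  | nil => intro m; rfl
  | cons ab S ih => intro m; simp [List.foldl_cons, ih, pvMark, length_pvA_markRange]

-- getD after List.set, in closed form
theorem pv_getD_set {α : Type} (m : List α) (k i : Nat) (v d : α) :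
    (m.set k v).getD i d = if i = k ∧ k < m.length then v else m.getD i d := by
  simp only [List.getD_eq_getElem?_getD, List.getElem?_set]
  split_ifs with h1 h2 h3 h4 <;> try rfl
  all_goals simp_all

-- pointwise value of one marking step (for spans that fit the mask)
theorem pvA_markRange_getD_aux (i : Nat) (b : Int) :
    ∀ (fuel : Nat) (a : Int) (m : List Bool), (b - a).toNat ≤ fuel → 0 ≤ a → b ≤ (m.length : Int) →
    (pvA_markRange m a b).getD i false =
      ((decide (a ≤ (i : Int) ∧ (i : Int) < b)) || m.getD i false) := by
  intro fuel
  induction fuel with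
  | zero =>
      intro a m hf ha hb
      have hba : b ≤ a := by omega
      unfold pvA_markRange
      rw [PySem.List.pyRange_one_eq_nil hba]
      simp only [List.foldl_nil]
      have : ¬ (a ≤ (i : Int) ∧ (i : Int) < b) := by omega
      simp [this]
  | succ f ih =>
      intro a m hf ha hb
      by_cases hba : b ≤ a
      · unfold pvA_markRange
        rw [PySem.List.pyRange_one_eq_nil hba]
        simp only [List.foldl_nil]
        have : ¬ (a ≤ (i : Int) ∧ (i : Int) < b) := by omega
        simp [this]
      · have hab : a < b := by omega
        unfold pvA_markRange
        rw [PySem.List.pyRange_one_cons hab]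
        simp only [List.foldl_cons]
        have hset : PySem.List.pySetD m a true = m.set a.toNat true :=
          PySem.List.pySetD_of_nonneg m true ha
        rw [hset]
        have hstep : ((PySem.List.pyRange (a + 1) b 1).foldl
            (fun m pos => PySem.List.pySetD m pos true) (m.set a.toNat true))
            = pvA_markRange (m.set a.toNat true) (a + 1) b := rfl
        rw [hstep, ih (a + 1) (m.set a.toNat true) (by omega) (by omega)
              (by simpa using hb)]
        rw [pv_getD_set]
        have haN : (a.toNat : Int) = a := Int.toNat_of_nonneg ha
        by_cases hia : i = a.toNat
        · have hlt : a.toNat < m.length := by omega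
          have h1 : ¬ (a + 1 ≤ (i : Int) ∧ (i : Int) < b) := by omega
          have h2 : (a ≤ (i : Int) ∧ (i : Int) < b) := by
            constructor <;> omega
          rw [if_pos ⟨hia, hlt⟩]
          simp [h2]
        · have h3 : ¬ (i = a.toNat ∧ a.toNat < m.length) := by tauto
          rw [if_neg h3]
          have h4 : ((a + 1 ≤ (i : Int) ∧ (i : Int) < b)) ↔ ((a ≤ (i : Int) ∧ (i : Int) < b)) := by
            omega
        -- turns the decide on a+1 into the decide on a
          simp only [decide_eq_decide.mpr h4]

theorem pvA_markRange_getD (i : Nat) (b a : Int) (m : List Bool)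
    (ha : 0 ≤ a) (hb : b ≤ (m.length : Int)) :
    (pvA_markRange m a b).getD i false =
      ((decide (a ≤ (i : Int) ∧ (i : Int) < b)) || m.getD i false) :=
  pvA_markRange_getD_aux i b (b - a).toNat a m le_rfl ha hb

-- pointwise value of the marking fold
theorem markfold_getD (i : Nat) :
    ∀ (S : List (Int × Int)) (m : List Bool),
    (∀ ab ∈ S, pvGood m.length ab) →
    (S.foldl pvMark m).getD i false =
      (S.any (fun ab => decide (ab.1 ≤ (i : Int) ∧ (i : Int) < ab.2)) || m.getD i false) := by
  intro S
  induction S with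
  | nil => intro m h; simp
  | cons ab S ih =>
      intro m h
      obtain ⟨ha, hab, hb⟩ := h ab (by simp)
      simp only [List.foldl_cons, List.any_cons]
      have hmin : min ab.2 (m.length : Int) = ab.2 := by omega
      have hm1 : pvMark m ab = pvA_markRange m ab.1 ab.2 := by
        simp [pvMark, hmin]
      have hlen : (pvMark m ab).length = m.length := by
        simp [pvMark, length_pvA_markRange]
      rw [ih (pvMark m ab) (by rw [hlen]; intro x hx; exact h x (by simp [hx]))]
      rw [hm1, pvA_markRange_getD i ab.2 ab.1 m ha hb]
      cases hc : decide (ab.1 ≤ (i : Int) ∧ (i : Int) < ab.2) <;>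
        cases hany : S.any (fun ab => decide (ab.1 ≤ (i : Int) ∧ (i : Int) < ab.2)) <;>
        simp_all

-- === B side ===

theorem length_bumpfold (S : List (Int × Int)) :
    ∀ (d : List Int),
    (S.foldl
        (fun delta ab =>
          let d1 := PySem.List.pySetD delta ab.1 (PySem.List.pyGetD delta ab.1 0 + 1)
          PySem.List.pySetD d1 ab.2 (PySem.List.pyGetD d1 ab.2 0 - 1)) d).length = d.length := by
  induction S with
  | nil => intro d; rfl
  | cons ab S ih => intro d; simp [List.foldl_cons, ih, PySem.List.length_pySetD]

theorem length_pvB_delta (n : Nat) (S : List (Int × Int)) :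
    (pvB_delta n S).length = n + 1 := by
  unfold pvB_delta
  rw [length_bumpfold]
  simp

-- one '+=' bump shifts the prefix sum by v exactly when the bumped cell is inside the prefix
theorem sum_take_set (v : Int) :
    ∀ (d : List Int) (k i : Nat), k < d.length →
    ((d.set k (d.getD k 0 + v)).take (i + 1)).sum
      = (d.take (i + 1)).sum + (if k ≤ i then v else 0) := by
  intro d
  induction d with
  | nil => intro k i h; simp at h
  | cons x ds ih =>
      intro k i h
      cases k with
      | zero =>
          simp only [List.getD_cons_zero, List.set_cons_zero, List.take_succ_cons,
            List.sum_cons, if_pos (Nat.zero_le i)]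
          ring
      | succ k =>
          simp only [List.getD_cons_succ, List.set_cons_succ, List.take_succ_cons,
            List.sum_cons]
          cases i with
          | zero => simp
          | succ j =>
              rw [ih k j (by simpa using h)]
              simp only [Nat.add_le_add_iff_right]
              ring

-- prefix sums of the difference array count span starts minus span ends
theorem pvB_delta_psum (n : Nat) (i : Nat) :
    ∀ (S : List (Int × Int)) (d : List Int), d.length = n + 1 →
    (∀ ab ∈ S, pvGood n ab) →
    ((S.foldl
        (fun delta ab =>
          let d1 := PySem.List.pySetD delta ab.1 (PySem.List.pyGetD delta ab.1 0 + 1)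
          PySem.List.pySetD d1 ab.2 (PySem.List.pyGetD d1 ab.2 0 - 1)) d).take (i + 1)).sum
      = (d.take (i + 1)).sum
        + (S.map (fun ab => (if ab.1 ≤ (i : Int) then (1 : Int) else 0)
              + (if ab.2 ≤ (i : Int) then (-1 : Int) else 0))).sum := by
  intro S
  induction S with
  | nil => intro d hd hS; simp
  | cons ab S ih =>
      intro d hd hS
      obtain ⟨ha0, hab, hbn⟩ := hS ab (by simp)
      have hb0 : (0 : Int) ≤ ab.2 := by omega
      have haN : ((ab.1.toNat : Nat) : Int) = ab.1 := Int.toNat_of_nonneg ha0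
      have hbN : ((ab.2.toNat : Nat) : Int) = ab.2 := Int.toNat_of_nonneg hb0
      simp only [List.foldl_cons, List.map_cons, List.sum_cons]
      rw [← haN, ← hbN]
      simp only [PySem.List.pyGetD_natCast, PySem.List.pySetD_natCast]
      have haL : ab.1.toNat < d.length := by omega
      have hbL : ab.2.toNat < (d.set ab.1.toNat (d.getD ab.1.toNat 0 + 1)).length := by
        simp only [List.length_set]; omega
      rw [ih _ (by simp only [List.length_set]; omega) (fun x hx => hS x (by simp [hx]))]
      have hub : (d.set ab.1.toNat (d.getD ab.1.toNat 0 + 1)).getD ab.2.toNat 0 - 1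
          = (d.set ab.1.toNat (d.getD ab.1.toNat 0 + 1)).getD ab.2.toNat 0 + (-1) := by ring
      rw [hub, sum_take_set (-1) _ ab.2.toNat i hbL, sum_take_set 1 d ab.1.toNat i haL]
      have c1 : (ab.1.toNat ≤ i) ↔ ((ab.1.toNat : Int) ≤ (i : Int)) := by omega
      have c2 : (ab.2.toNat ≤ i) ↔ ((ab.2.toNat : Int) ≤ (i : Int)) := by omega
      split_ifs <;> omega

theorem length_pvB_sweep (cur : Int) :
    ∀ (ds : List Int), (pvB_sweep cur ds).length = ds.length := by
  intro ds
  induction ds generalizing cur with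
  | nil => rfl
  | cons d ds ih => simp [pvB_sweep, ih]

theorem pvB_sweep_getD :
    ∀ (ds : List Int) (i : Nat) (cur : Int), i < ds.length →
    (pvB_sweep cur ds).getD i false = decide (0 < cur + (ds.take (i + 1)).sum) := by
  intro ds
  induction ds with
  | nil => intro i cur h; simp at h
  | cons d ds ih =>
      intro i cur h
      cases i with
      | zero => simp [pvB_sweep]
      | succ j =>
          simp only [pvB_sweep, List.take_succ_cons, List.sum_cons, List.getD_cons_succ]
          rw [ih j (cur + d) (by simpa using h)]
          ring_nf

-- counting form of the contribution sum
theorem contrib_sum_eq_countP (i : Nat) (n : Nat) :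
    ∀ (S : List (Int × Int)), (∀ ab ∈ S, pvGood n ab) →
    (S.map (fun ab => (if ab.1 ≤ (i : Int) then (1 : Int) else 0)
        + (if ab.2 ≤ (i : Int) then (-1 : Int) else 0))).sum
      = (S.countP (fun ab => decide (ab.1 ≤ (i : Int) ∧ (i : Int) < ab.2)) : Int) := by
  intro S
  induction S with
  | nil => simp
  | cons ab S ih =>
      intro hS
      obtain ⟨ha0, hab, hbn⟩ := hS ab (by simp)
      simp only [List.map_cons, List.sum_cons, List.countP_cons,
        ih (fun x hx => hS x (by simp [hx]))]
      push_cast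
      split_ifs <;> simp_all <;> omega

-- ===== VERDICT (by name: the statement is the Claim_ definition above) =====
theorem build_protection_mask_py_spec : Claim_equal_build_protection_mask_py := by
  unfold Claim_equal_build_protection_mask_py
  intro text tokens _
  unfold Spec_build_protection_mask_py
  have hgood : ∀ ab ∈ pvB_spans text.toList tokens, pvGood text.toList.length ab :=
    pvB_spans_good _ _
  set n := text.toList.length with hn
  set S := pvB_spans text.toList tokens with hS
  rw [pvA_eq_markfold]
  have hlenA : ((S.foldl pvMark (List.replicate n false)).length) = n := by
    rw [length_markfold]; simp
  have hlenD : (pvB_delta n S).length = n + 1 := length_pvB_delta n S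
  unfold build_protection_mask_py_alt
  rw [PySem.List.slice_to_natCast, ← hn, ← hS]
  have hlenB : (pvB_sweep 0 ((pvB_delta n S).take n)).length = n := by
    rw [length_pvB_sweep, List.length_take]; omega
  apply List.ext_getElem (by rw [hlenA, hlenB])
  intro i h1 h2
  rw [← List.getD_eq_getElem _ false h1, ← List.getD_eq_getElem _ false h2]
  have hi : i < n := by rw [hlenA] at h1; exact h1
  rw [markfold_getD i S _ (by simpa using hgood)]
  rw [pvB_sweep_getD _ i 0 (by rw [List.length_take]; omega)]
  rw [List.take_take, Nat.min_eq_left (by omega)]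
  rw [show pvB_delta n S
      = S.foldl
          (fun delta ab =>
            let d1 := PySem.List.pySetD delta ab.1 (PySem.List.pyGetD delta ab.1 0 + 1)
            PySem.List.pySetD d1 ab.2 (PySem.List.pyGetD d1 ab.2 0 - 1))
          (List.replicate (n + 1) 0) from rfl]
  rw [pvB_delta_psum n i S _ (by simp) hgood]
  rw [contrib_sum_eq_countP i n S hgood]
  have hrepl : (List.replicate n false).getD i false = false := by
    simp [List.getD_eq_getElem?_getD, List.getElem?_replicate]
    split_ifs
    all_goals rfl
  rw [hrepl]
  simp only [Bool.or_false, List.take_replicate, List.sum_replicate, smul_zero, zero_add]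
  rw [Bool.eq_iff_iff]
  simp only [List.any_eq_true, decide_eq_true_eq]
  constructor
  · intro hex
    rcases hex with ⟨ab, hmem, hc⟩
    have : 0 < S.countP (fun ab => decide (ab.1 ≤ (i : Int) ∧ (i : Int) < ab.2)) :=
      List.countP_pos_iff.mpr ⟨ab, hmem, by simpa using hc⟩
    exact_mod_cast this
  · intro hpos
    have : 0 < S.countP (fun ab => decide (ab.1 ≤ (i : Int) ∧ (i : Int) < ab.2)) := by
      exact_mod_cast hpos
    rcases List.countP_pos_iff.mp this with ⟨ab, hmem, hc⟩
    exact ⟨ab, hmem, by simpa using hc⟩
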